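-- pv_equiv track=rewrite | github.com/lpk04/IR | src/prepare_sentiment.py | _attach_negations
-- ===== SOURCE A (Python) =====
-- NEGATION_WORDS = {"not", "never", "none", "nothing", "no", "neither", "nor"}
--
-- def _attach_negations(tokens: list[str]) -> list[str]:
--     """
--     Replace "NEG token" pairs with a "NEG_token" bigram.
--     Negation scope is limited to one token.
--     """
--     result: list[str] = []
--     skip_next = False
--     for i, token in enumerate(tokens):
--         if skip_next:
--             skip_next = False
--             continue
--         if token in NEGATION_WORDS and i + 1 < len(tokens):
--             result.append(f"{token}_{tokens[i + 1]}")
--             skip_next = True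
--         else:
--             result.append(token)
--     return result
-- ===== SOURCE B (Python) =====
-- NEGATION_WORDS = {"not", "never", "none", "nothing", "no", "neither", "nor"}
--
-- def _attach_negations(tokens):
--     # stage 1: group the stream into (negation-run, following-ordinary-token) chunks
--     groups = []
--     run = []
--     for tok in tokens:
--         if tok in NEGATION_WORDS:
--             run.append(tok)
--         else:
--             groups.append((run, tok))
--             run = []
--     groups.append((run, None))
--     # stage 2: render each group independently: pair the run up,
--     # an odd trailing negation merging with the group's closing token
--     out = []
--     for run, close in groups:
--         while len(run) >= 2:
--             out.append(run[0] + "_" + run[1])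
--             run = run[2:]
--         if run:
--             out.append(run[0] if close is None else run[0] + "_" + close)
--         elif close is not None:
--             out.append(close)
--     return out
-- ===== Notes on version B (the rewrite author's own statement) =====
-- stated objective: alternative
-- what changed: B works in two staged passes: it first groups the token stream into maximal negation-word runs each closed by the following ordinary token, then renders every group independently by pairing the run up by parity (an odd trailing negation merging with the group's closing token), instead of A's single stateful pass carrying a skip_next flag.
import Mathlib
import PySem

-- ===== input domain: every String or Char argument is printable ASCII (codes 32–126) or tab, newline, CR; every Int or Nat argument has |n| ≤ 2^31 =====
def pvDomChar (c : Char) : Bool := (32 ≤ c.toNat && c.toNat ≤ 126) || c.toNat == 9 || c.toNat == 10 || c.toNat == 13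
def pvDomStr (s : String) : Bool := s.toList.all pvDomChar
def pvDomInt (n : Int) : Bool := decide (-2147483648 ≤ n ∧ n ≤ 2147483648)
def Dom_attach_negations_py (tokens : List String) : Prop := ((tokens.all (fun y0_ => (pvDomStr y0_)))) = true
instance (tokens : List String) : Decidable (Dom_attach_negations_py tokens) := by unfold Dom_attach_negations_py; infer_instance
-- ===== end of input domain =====

-- B is a different algorithm of the same cost: two staged passes (group into negation runs, then
-- render each run by parity pairing) instead of A's single stateful pass with a skip_next flag.
-- ===== PORT A =====
-- module-level constant NEGATION_WORDS (a Python set, shared by both implementations)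
def pvNegWords : PySem.Set String :=
  PySem.Set.ofList ["not", "never", "none", "nothing", "no", "neither", "nor"]

-- the body of A's for-loop, acting on the state (result, skip_next)
def pvStepA (tokens : List String) (st : List String × Bool) (p : Int × String) : List String × Bool :=
  if st.2 then (st.1, false)
  else if PySem.Set.contains pvNegWords p.2 ∧ p.1 + 1 < (tokens.length : Int) then
    (st.1 ++ [p.2 ++ "_" ++ ((PySem.List.pyGet? tokens (p.1 + 1)).getD "")], true)
  else (st.1 ++ [p.2], false)

-- for-loop over enumerate(tokens) with state (result, skip_next)
def attach_negations_py (tokens : List String) : List String :=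
  ((PySem.List.enumerate tokens 0).foldl (pvStepA tokens) ([], false)).1

-- ===== PORT B =====
-- stage 1 of Source B: the body of `for tok in tokens`, acting on the state (groups, run)
def pvStep1 (st : List (List String × Option String) × List String) (tok : String) :
    List (List String × Option String) × List String :=
  if PySem.Set.contains pvNegWords tok then (st.1, st.2 ++ [tok])
  else (st.1 ++ [(st.2, some tok)], [])

-- stage 2 of Source B, inner `while len(run) >= 2: out.append(run[0] + "_" + run[1]); run = run[2:]`
def pvPairRun (run out : List String) : List String × List String :=
  if h : 2 ≤ run.length then
    pvPairRun (PySem.List.slice run (some 2) none)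
      (out ++ [run[0]'(by omega) ++ "_" ++ run[1]'(by omega)])
  else (out, run)
termination_by run.length
decreasing_by
  have : PySem.List.slice run (some 2) none = run.drop 2 := by
    have := PySem.List.slice_from run (a := 2) (by norm_num)
    simpa using this
  simp [this]; omega

-- stage 2 of Source B: the body of `for run, close in groups`, acting on out
def pvRenderStep (out : List String) (g : List String × Option String) : List String :=
  let p := pvPairRun g.1 out
  match p.2 with
  | r :: _ =>
    match g.2 with
    | none => p.1 ++ [r]
    | some c => p.1 ++ [r ++ "_" ++ c]
  | [] =>
    match g.2 with
    | some c => p.1 ++ [c]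
    | none => p.1

def attach_negations_py_alt (tokens : List String) : List String :=
  let st := tokens.foldl pvStep1 ([], [])
  (st.1 ++ [(st.2, none)]).foldl pvRenderStep []

-- ===== PRECONDITION & SPEC =====
def Spec_attach_negations_py (tokens : List String) (out : List String) : Prop := out = attach_negations_py_alt tokens
instance (tokens : List String) (out : List String) : Decidable (Spec_attach_negations_py tokens out) := by unfold Spec_attach_negations_py; infer_instance

-- ===== CLAIM (what is proved, stated in full; the proofs are below) =====
def Claim_equal_attach_negations_py : Prop := ∀ (tokens : List String), Dom_attach_negations_py tokens → Spec_attach_negations_py tokens (attach_negations_py tokens)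

-- ===== LEMMAS AND PROOFS =====

-- common structural characterisation of both programs' output
def pvNegSpec : List String → List String
  | [] => []
  | [x] => [x]
  | x :: y :: rest =>
    if PySem.Set.contains pvNegWords x then (x ++ "_" ++ y) :: pvNegSpec rest
    else x :: pvNegSpec (y :: rest)

theorem pvFoldA_eq (tokens : List String) :
    ∀ (suf : List String) (j : Nat) (acc : List String), tokens.drop j = suf →
      ((PySem.List.enumerate suf (j : Int)).foldl (pvStepA tokens) (acc, false))
        = (acc ++ pvNegSpec suf, false) := by
  intro suf
  induction suf using pvNegSpec.induct with
  | case1 =>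
    intro j acc h
    simp [PySem.List.enumerate_nil, pvNegSpec]
  | case2 x =>
    intro j acc h
    have hj : j < tokens.length := by
      by_contra hc
      simp [List.drop_eq_nil_of_le (Nat.le_of_not_lt hc)] at h
    have hlen1 : tokens.length = j + 1 := by
      have := congrArg List.length h
      simp at this; omega
    have hj1 : ¬ ((j : Int) + 1 < (tokens.length : Int)) := by rw [hlen1]; push_cast; omega
    rw [PySem.List.enumerate_cons, PySem.List.enumerate_nil]
    simp only [List.foldl_cons, List.foldl_nil]
    simp [pvStepA, hj1, pvNegSpec]
  | case3 x y rest hneg ih =>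
    intro j acc h
    have hmem : x ∈ pvNegWords := by simpa using hneg
    have hj : j < tokens.length := by
      by_contra hc
      simp [List.drop_eq_nil_of_le (Nat.le_of_not_lt hc)] at h
    have hlen : rest.length + 2 + j = tokens.length := by
      have := congrArg List.length h
      simp at this; omega
    have hy' : tokens[j + 1]'(by omega) = y := by
      have h1 : tokens.drop (j + 1) = y :: rest := by
        have : tokens.drop (j + 1) = (tokens.drop j).tail := by rw [List.tail_drop]
        rw [this, h]; rfl
      have := List.drop_eq_getElem_cons (l := tokens) (by omega : j + 1 < tokens.length)
      rw [h1] at this; exact (List.cons.injEq .. ▸ this).1.symm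
    have hget : PySem.List.pyGet? tokens ((j : Int) + 1) = some y := by
      rw [show ((j : Int) + 1) = ((j + 1 : Nat) : Int) by push_cast; ring,
        PySem.List.pyGet?_natCast, List.getElem?_eq_getElem (by omega)]
      exact congrArg some hy'
    have hdrop2 : tokens.drop (j + 2) = rest := by
      have : tokens.drop (j + 2) = ((tokens.drop j).tail).tail := by
        rw [List.tail_drop, List.tail_drop]
      rw [this, h]; rfl
    have hj1 : ((j : Int) + 1 < (tokens.length : Int)) := by omega
    rw [PySem.List.enumerate_cons, PySem.List.enumerate_cons]
    simp only [List.foldl_cons]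
    have e1 : pvStepA tokens (acc, false) ((j : Int), x)
        = (acc ++ [x ++ "_" ++ y], true) := by
      simp [pvStepA, hmem, hj1, hget]
    have e2 : pvStepA tokens (acc ++ [x ++ "_" ++ y], true) ((j : Int) + 1, y)
        = (acc ++ [x ++ "_" ++ y], false) := by
      simp [pvStepA]
    rw [e1, e2, show ((j : Int) + 1 + 1) = ((j + 2 : Nat) : Int) by push_cast; ring,
      ih (j + 2) _ hdrop2]
    simp [pvNegSpec, hmem]
  | case4 x y rest hneg ih =>
    intro j acc h
    have hnmem : x ∉ pvNegWords := by simpa using hneg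
    have hj : j < tokens.length := by
      by_contra hc
      simp [List.drop_eq_nil_of_le (Nat.le_of_not_lt hc)] at h
    have hdrop1 : tokens.drop (j + 1) = y :: rest := by
      have : tokens.drop (j + 1) = (tokens.drop j).tail := by rw [List.tail_drop]
      rw [this, h]; rfl
    rw [PySem.List.enumerate_cons]
    simp only [List.foldl_cons]
    have e1 : pvStepA tokens (acc, false) ((j : Int), x) = (acc ++ [x], false) := by
      simp [pvStepA, hnmem]
    rw [e1, show ((j : Int) + 1) = ((j + 1 : Nat) : Int) by push_cast; ring,
      ih (j + 1) _ hdrop1]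
    simp [pvNegSpec, hnmem]

-- ===== lemmas for the B side =====

-- pairs produced from a run, and its parity leftover
def pvPairs : List String → List String
  | [] => []
  | [_] => []
  | x :: y :: r => (x ++ "_" ++ y) :: pvPairs r

def pvRem : List String → List String
  | [] => []
  | [x] => [x]
  | _ :: _ :: r => pvRem r

theorem pvRem_small (l : List String) : pvRem l = [] ∨ ∃ x, pvRem l = [x] := by
  induction l using pvRem.induct with
  | case1 => left; rfl
  | case2 x => right; exact ⟨x, rfl⟩
  | case3 _ _ r ih => simpa [pvRem] using ih

theorem pvPairRun_eq (run out : List String) :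
    pvPairRun run out = (out ++ pvPairs run, pvRem run) := by
  induction run using pvPairs.induct generalizing out with
  | case1 => unfold pvPairRun; simp [pvPairs, pvRem]
  | case2 x => unfold pvPairRun; simp [pvPairs, pvRem]
  | case3 x y r ih =>
    unfold pvPairRun
    have hs : PySem.List.slice (x :: y :: r) (some 2) none = r := by
      have := PySem.List.slice_from (x :: y :: r) (a := 2) (by norm_num)
      simpa using this
    simp only [List.length_cons, hs]
    rw [dif_pos (by omega)]
    rw [ih]
    simp [pvPairs, pvRem]

-- what one group contributes to the output
def pvRenderOne (g : List String × Option String) : List String :=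
  pvPairs g.1 ++
    (match pvRem g.1, g.2 with
      | r :: _, none => [r]
      | r :: _, some c => [r ++ "_" ++ c]
      | [], some c => [c]
      | [], none => [])

theorem pvRenderStep_eq (out : List String) (g : List String × Option String) :
    pvRenderStep out g = out ++ pvRenderOne g := by
  unfold pvRenderStep pvRenderOne
  rw [pvPairRun_eq]
  rcases pvRem_small g.1 with hrem | ⟨x, hrem⟩ <;>
    rcases hc : g.2 with _ | c <;> simp [hrem]

theorem pvFoldRender_eq (gs : List (List String × Option String)) :
    ∀ out, gs.foldl pvRenderStep out = out ++ gs.flatMap pvRenderOne := by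
  induction gs with
  | nil => intro out; simp
  | cons g gs ih =>
    intro out
    simp only [List.foldl_cons, List.flatMap_cons, pvRenderStep_eq, ih]
    simp

-- structural description of stage 1's grouping
def pvChunks (run : List String) : List String → List (List String × Option String)
  | [] => [(run, none)]
  | t :: ts =>
    if PySem.Set.contains pvNegWords t then pvChunks (run ++ [t]) ts
    else (run, some t) :: pvChunks [] ts

theorem pvStage1_eq (toks : List String) :
    ∀ (gs : List (List String × Option String)) (run : List String),
      (toks.foldl pvStep1 (gs, run)).1 ++ [((toks.foldl pvStep1 (gs, run)).2, none)]
        = gs ++ pvChunks run toks := by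
  induction toks with
  | nil => intro gs run; simp [pvChunks]
  | cons t ts ih =>
    intro gs run
    by_cases h : PySem.Set.contains pvNegWords t = true
    · have hm : t ∈ pvNegWords := by simpa using h
      have hstep : pvStep1 (gs, run) t = (gs, run ++ [t]) := by simp [pvStep1, hm]
      simp only [List.foldl_cons, hstep, pvChunks, h, if_pos]
      exact ih gs (run ++ [t])
    · have hm : t ∉ pvNegWords := by simpa using h
      have hstep : pvStep1 (gs, run) t = (gs ++ [(run, some t)], []) := by simp [pvStep1, hm]
      simp only [List.foldl_cons, hstep, pvChunks, h]
      rw [ih (gs ++ [(run, some t)]) []]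
      simp
  -- a non-negation head passes through pvNegSpec unchanged

theorem pvNegSpec_cons_nonneg (x : String) (l : List String)
    (h : PySem.Set.contains pvNegWords x = false) :
    pvNegSpec (x :: l) = x :: pvNegSpec l := by
  cases l with
  | nil => rfl
  | cons y r =>
    have hm : x ∉ pvNegWords := by simpa using h
    simp [pvNegSpec, hm]

-- how pvNegSpec acts on an all-negation run followed by the rest
theorem pvNegSpec_run (run : List String)
    (hall : ∀ x ∈ run, PySem.Set.contains pvNegWords x = true) :
    ∀ rest, pvNegSpec (run ++ rest) =
      pvPairs run ++
        (match pvRem run, rest with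
          | [], rest => pvNegSpec rest
          | [x], [] => [x]
          | [x], y :: rs => (x ++ "_" ++ y) :: pvNegSpec rs
          | _, _ => []) := by
  induction run using pvPairs.induct with
  | case1 => intro rest; simp [pvPairs, pvRem]
  | case2 x =>
    intro rest
    have hx : x ∈ pvNegWords := by simpa using hall x (by simp)
    cases rest with
    | nil => simp [pvPairs, pvRem, pvNegSpec]
    | cons y rs => simp [pvPairs, pvRem, pvNegSpec, hx]
  | case3 x y r ih =>
    intro rest
    have hx : x ∈ pvNegWords := by simpa using hall x (by simp)
    have hr : ∀ z ∈ r, PySem.Set.contains pvNegWords z = true := by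
      intro z hz; exact hall z (by simp [hz])
    have hstep : pvNegSpec (x :: y :: (r ++ rest))
        = (x ++ "_" ++ y) :: pvNegSpec (r ++ rest) := by
      simp [pvNegSpec, hx]
    simp only [List.cons_append, hstep, pvPairs, pvRem]
    rw [ih hr rest]

-- rendering the chunks of the remaining tokens yields pvNegSpec
theorem pvChunks_render (toks : List String) :
    ∀ run, (∀ x ∈ run, PySem.Set.contains pvNegWords x = true) →
      (pvChunks run toks).flatMap pvRenderOne = pvNegSpec (run ++ toks) := by
  induction toks with
  | nil =>
    intro run hall
    rw [pvNegSpec_run run hall []]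
    rcases pvRem_small run with hrem | ⟨x, hrem⟩ <;>
      simp [pvChunks, pvRenderOne, pvNegSpec, hrem]
  | cons t ts ih =>
    intro run hall
    by_cases h : PySem.Set.contains pvNegWords t = true
    · have hall' : ∀ x ∈ run ++ [t], PySem.Set.contains pvNegWords x = true := by
        intro x hx
        rcases List.mem_append.mp hx with hx | hx
        · exact hall x hx
        · simp at hx; subst hx; exact h
      simp only [pvChunks, h, if_pos]
      rw [ih (run ++ [t]) hall']
      simp
    · have hf : PySem.Set.contains pvNegWords t = false := by
        cases hb : PySem.Set.contains pvNegWords t with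
        | false => rfl
        | true => exact absurd hb h
      simp only [pvChunks, hf, Bool.false_eq_true, if_false, List.flatMap_cons]
      rw [ih [] (by intro x hx; simp at hx)]
      rw [pvNegSpec_run run hall (t :: ts)]
      rcases pvRem_small run with hrem | ⟨x, hrem⟩
      · simp [pvRenderOne, hrem, pvNegSpec_cons_nonneg t ts hf]
      · simp [pvRenderOne, hrem]

-- ===== VERDICT (by name: the statement is the Claim_ definition above) =====
theorem attach_negations_py_spec : Claim_equal_attach_negations_py := by
  intro tokens _
  unfold Spec_attach_negations_py attach_negations_py attach_negations_py_alt
  have h1 := pvFoldA_eq tokens tokens 0 [] rfl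
  simp only [Nat.cast_zero] at h1
  rw [h1]
  rw [pvFoldRender_eq, pvStage1_eq tokens [] []]
  simp only [List.nil_append]
  rw [pvChunks_render tokens [] (by intro x hx; simp at hx)]
  simp
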